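-- pv_equiv track=rewrite | github.com/OpenSquawk/OpenSquawk-MSFS-Bridge | bridge/main.py | _encode_transponder_bcd
-- ===== SOURCE A (Python) =====
-- def _encode_transponder_bcd(code: int) -> int | None:
--     if code < 0:
--         return None
--
--     digits = f"{code:04d}"
--     if len(digits) != 4:
--         return None
--
--     if any(char not in "01234567" for char in digits):
--         return None
--
--     result = 0
--     for char in digits:
--         result = (result << 4) | int(char)
--     return result
-- ===== SOURCE B (Python) =====
-- def _encode_transponder_bcd(code: int) -> int | None:
--     if code < 0 or code > 9999:
--         return None
--     thousands = code // 1000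
--     hundreds = code // 100 % 10
--     tens = code // 10 % 10
--     units = code % 10
--     if thousands > 7 or hundreds > 7 or tens > 7 or units > 7:
--         return None
--     return thousands << 12 | hundreds << 8 | tens << 4 | units
-- ===== Notes on version B (the rewrite author's own statement) =====
-- stated objective: idiomatic
-- what changed: Replaces the f-string formatting, character-membership test against "01234567" and per-character int() shift loop with a pure-arithmetic version: a range guard 0..9999, four digits extracted by // and %, and a closed-form shift/or combine.
import Mathlib
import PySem

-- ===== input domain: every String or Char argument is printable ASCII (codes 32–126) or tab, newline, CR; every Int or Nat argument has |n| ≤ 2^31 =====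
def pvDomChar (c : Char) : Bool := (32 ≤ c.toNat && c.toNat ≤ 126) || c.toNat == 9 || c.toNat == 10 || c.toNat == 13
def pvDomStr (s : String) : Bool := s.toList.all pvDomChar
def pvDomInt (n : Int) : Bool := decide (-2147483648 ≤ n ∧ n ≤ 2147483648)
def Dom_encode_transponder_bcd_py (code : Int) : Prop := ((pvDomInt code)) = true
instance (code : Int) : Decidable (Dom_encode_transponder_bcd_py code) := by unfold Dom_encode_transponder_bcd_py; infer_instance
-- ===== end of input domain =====

-- B replaces A's f-string formatting and character tests with arithmetic digit extraction
-- and a closed-form shift/or combine (idiomatic; same O(1) cost).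

-- ===== PORT A =====
def encode_transponder_bcd_py (code : Int) : Option Int :=
  if code < 0 then none
  else
    -- f"{code:04d}" : for code ≥ 0 (guaranteed here) this is str(code) left-padded with '0' to width 4;
    -- ported exactly as pad ++ PySem.Int.toChars code
    let s := PySem.Int.toChars code
    let digits := List.replicate (4 - s.length) '0' ++ s
    if digits.length ≠ 4 then none
    else if digits.any (fun c => !((("01234567" : String).toList).contains c)) then none
    -- int(char): exact via PySem.Int.ofChars?; the guard above ensures it is a digit, so getD 0 is never taken
    else some (digits.foldl (fun result c => PySem.Int.bor (result <<< (4 : Nat)) ((PySem.Int.ofChars? [c]).getD 0)) 0)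

-- ===== PORT B =====
def encode_transponder_bcd_py_alt (code : Int) : Option Int :=
  if code < 0 ∨ 9999 < code then none
  else
    let thousands := PySem.Int.floordiv code 1000
    let hundreds := PySem.Int.mod (PySem.Int.floordiv code 100) 10
    let tens := PySem.Int.mod (PySem.Int.floordiv code 10) 10
    let units := PySem.Int.mod code 10
    if 7 < thousands ∨ 7 < hundreds ∨ 7 < tens ∨ 7 < units then none
    else some (PySem.Int.bor (thousands <<< (12 : Nat))
      (PySem.Int.bor (hundreds <<< (8 : Nat)) (PySem.Int.bor (tens <<< (4 : Nat)) units)))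

-- ===== PRECONDITION & SPEC =====
def Spec_encode_transponder_bcd_py (code : Int) (out : Option Int) : Prop := out = encode_transponder_bcd_py_alt code
instance (code : Int) (out : Option Int) : Decidable (Spec_encode_transponder_bcd_py code out) := by unfold Spec_encode_transponder_bcd_py; infer_instance

-- ===== CLAIM (what is proved, stated in full; the proofs are below) =====
def Claim_equal_encode_transponder_bcd_py : Prop := ∀ (code : Int), Dom_encode_transponder_bcd_py code → Spec_encode_transponder_bcd_py code (encode_transponder_bcd_py code)

-- ===== LEMMAS AND PROOFS =====


-- toDigitsCore with sufficient fuel produces the reversed decimal digits (specific to A's f-string port)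
lemma pv_core_eq : ∀ (f n : Nat) (l : List Char), 0 < n → n ≤ f →
    Nat.toDigitsCore 10 f n l = ((Nat.digits 10 n).map Nat.digitChar).reverse ++ l := by
  intro f
  induction f with
  | zero => omega
  | succ f ih =>
    intro n l hn hf
    rw [Nat.digits_def' (by norm_num : 1 < 10) hn]
    simp only [Nat.toDigitsCore]
    by_cases hq : n / 10 = 0
    · have : Nat.digits 10 (n / 10) = [] := by simp [hq]
      simp [hq]
    · rw [if_neg hq, ih (n / 10) _ (by omega) (by omega)]
      simp

lemma pv_toChars_natCast (n : Nat) :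
    PySem.Int.toChars (n : Int) = ((Nat.digits 10 n).map Nat.digitChar).reverse ++
      (if n = 0 then ['0'] else []) := by
  have h0 : ¬ (n : Int) < 0 := by omega
  simp only [PySem.Int.toChars, h0, if_false, Int.toNat_natCast]
  by_cases hn : n = 0
  · subst hn; simp [Nat.toDigits, Nat.toDigitsCore]; rfl
  · rw [Nat.toDigits, pv_core_eq (n+1) n [] (by omega) (by omega)]
    simp [hn]

-- lower bound on the length of str(n): n ≥ 10^k has more than k digits
lemma pv_toDigitsCore_len_ge : ∀ (f n : Nat) (l : List Char), 0 < f →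
    l.length + 1 ≤ (Nat.toDigitsCore 10 f n l).length := by
  intro f
  induction f with
  | zero => omega
  | succ f ih =>
    intro n l _
    simp only [Nat.toDigitsCore]
    split
    · simp
    · rcases Nat.eq_zero_or_pos f with hf | hf
      · subst hf; simp [Nat.toDigitsCore]
      · have := ih (n / 10) (Nat.digitChar (n % 10) :: l) hf
        simp at this ⊢; omega

lemma pv_toDigitsCore_len_lb : ∀ (k f n : Nat) (l : List Char), 10 ^ k ≤ n → k < f →
    k + 1 + l.length ≤ (Nat.toDigitsCore 10 f n l).length := by
  intro k
  induction k with
  | zero =>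
    intro f n l hn hf
    have := pv_toDigitsCore_len_ge f n l hf
    omega
  | succ k ih =>
    intro f n l hn hf
    obtain ⟨f', rfl⟩ : ∃ f', f = f' + 1 := ⟨f - 1, by omega⟩
    have hq : 10 ^ k ≤ n / 10 := by
      have : 10 ^ (k+1) / 10 ≤ n / 10 := Nat.div_le_div_right hn
      simpa [Nat.pow_succ] using this
    have hq0 : n / 10 ≠ 0 := by
      have : 0 < 10 ^ k := Nat.pow_pos (by norm_num)
      omega
    simp only [Nat.toDigitsCore, hq0, if_false]
    have := ih f' (n / 10) (Nat.digitChar (n % 10) :: l) hq (by omega)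
    simp at this ⊢; omega

lemma pv_toChars_len_big (n : Int) (h : 10000 ≤ n) : 5 ≤ (PySem.Int.toChars n).length := by
  have h0 : ¬ n < 0 := by omega
  have hn : 10 ^ 4 ≤ n.toNat := by omega
  simp only [PySem.Int.toChars, h0, if_false]
  have := pv_toDigitsCore_len_lb 4 (n.toNat + 1) n.toNat [] hn (by omega)
  simpa [Nat.toDigits] using this

-- the zero-padded 4-character f-string of n < 10000 is its four decimal digit characters
lemma pv_digits4 (n : Nat) (h : n < 10000) :
    List.replicate (4 - (PySem.Int.toChars (n : Int)).length) '0' ++ PySem.Int.toChars (n : Int)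
      = [Nat.digitChar (n / 1000), Nat.digitChar (n / 100 % 10),
         Nat.digitChar (n / 10 % 10), Nat.digitChar (n % 10)] := by
  rw [pv_toChars_natCast]
  by_cases h0 : n = 0
  · subst h0; decide
  rcases Nat.lt_or_ge n 10 with h1 | h1
  · have e : Nat.digits 10 n = [n % 10] := by
      rw [Nat.digits_def' (by norm_num : 1 < 10) (by omega)]
      simp [show n / 10 = 0 by omega]
    rw [e]
    simp [h0, List.replicate_succ, show n / 1000 = 0 by omega, show n / 100 % 10 = 0 by omega,
      show n / 10 % 10 = 0 by omega]
    decide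
  rcases Nat.lt_or_ge n 100 with h2 | h2
  · have e : Nat.digits 10 n = [n % 10, n / 10 % 10] := by
      rw [Nat.digits_def' (by norm_num : 1 < 10) (by omega),
          Nat.digits_def' (by norm_num : 1 < 10) (by omega : 0 < n / 10)]
      simp [show n / 10 / 10 = 0 by omega, Nat.mod_eq_of_lt (show n / 10 < 10 by omega)]
    rw [e]
    simp [h0, List.replicate_succ, show n / 1000 = 0 by omega, show n / 100 % 10 = 0 by omega]
    decide
  rcases Nat.lt_or_ge n 1000 with h3 | h3
  · have e : Nat.digits 10 n = [n % 10, n / 10 % 10, n / 100 % 10] := by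
      rw [Nat.digits_def' (by norm_num : 1 < 10) (by omega),
          Nat.digits_def' (by norm_num : 1 < 10) (by omega : 0 < n / 10),
          Nat.digits_def' (by norm_num : 1 < 10) (by omega : 0 < n / 10 / 10)]
      simp [show n / 10 / 10 = n / 100 by omega, show n / 100 / 10 = 0 by omega,
        Nat.mod_eq_of_lt (show n / 100 < 10 by omega)]
    rw [e]
    simp [h0, List.replicate_succ, show n / 1000 = 0 by omega]
    decide
  · have e : Nat.digits 10 n = [n % 10, n / 10 % 10, n / 100 % 10, n / 1000 % 10] := by
      rw [Nat.digits_def' (by norm_num : 1 < 10) (by omega),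
          Nat.digits_def' (by norm_num : 1 < 10) (by omega : 0 < n / 10),
          Nat.digits_def' (by norm_num : 1 < 10) (by omega : 0 < n / 10 / 10),
          Nat.digits_def' (by norm_num : 1 < 10) (by omega : 0 < n / 10 / 10 / 10)]
      simp [show n / 10 / 10 = n / 100 by omega, show n / 100 / 10 = n / 1000 by omega,
        show n / 1000 / 10 = 0 by omega, Nat.mod_eq_of_lt (show n / 1000 < 10 by omega)]
    rw [e]
    simp [h0, Nat.mod_eq_of_lt (show n / 1000 < 10 by omega)]

-- membership of a digit character in "01234567" is exactly digit < 8
lemma pv_mem8 : ∀ x : Nat, x < 10 →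
    ((("01234567" : String).toList).contains (Nat.digitChar x)) = decide (x < 8) := by decide

-- int(char) on a digit character gives back the digit
lemma pv_ofc : ∀ x : Nat, x < 10 →
    (PySem.Int.ofChars? [Nat.digitChar x]).getD 0 = (x : Int) := by decide

-- A's shift-accumulate over the four octal digits equals B's closed-form combine
lemma pv_chain : ∀ a < 8, ∀ b < 8, ∀ c < 8, ∀ d < 8,
    PySem.Int.bor ((PySem.Int.bor ((PySem.Int.bor ((PySem.Int.bor ((0 : Int) <<< (4:Nat)) ((a:Nat) : Int)) <<< (4:Nat)) ((b:Nat) : Int)) <<< (4:Nat)) ((c:Nat) : Int)) <<< (4:Nat)) ((d:Nat) : Int)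
      = PySem.Int.bor (((a:Nat) : Int) <<< (12:Nat)) (PySem.Int.bor (((b:Nat) : Int) <<< (8:Nat)) (PySem.Int.bor (((c:Nat) : Int) <<< (4:Nat)) ((d:Nat) : Int))) := by
  decide

lemma pv_mid (n : Nat) (h : n < 10000) :
    encode_transponder_bcd_py (n : Int) = encode_transponder_bcd_py_alt (n : Int) := by
  have hneg : ¬ (n : Int) < 0 := by omega
  have hc : ¬ ((n : Int) < 0 ∨ 9999 < (n : Int)) := by omega
  have ht : PySem.Int.floordiv (n : Int) 1000 = ((n / 1000 : Nat) : Int) := by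
    exact_mod_cast PySem.Int.floordiv_natCast n 1000
  have hh : PySem.Int.mod (PySem.Int.floordiv (n : Int) 100) 10 = ((n / 100 % 10 : Nat) : Int) := by
    have e : PySem.Int.floordiv (n : Int) 100 = ((n / 100 : Nat) : Int) := by
      exact_mod_cast PySem.Int.floordiv_natCast n 100
    rw [e]; exact_mod_cast PySem.Int.mod_natCast (n / 100) 10
  have hte : PySem.Int.mod (PySem.Int.floordiv (n : Int) 10) 10 = ((n / 10 % 10 : Nat) : Int) := by
    have e : PySem.Int.floordiv (n : Int) 10 = ((n / 10 : Nat) : Int) := by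
      exact_mod_cast PySem.Int.floordiv_natCast n 10
    rw [e]; exact_mod_cast PySem.Int.mod_natCast (n / 10) 10
  have hu : PySem.Int.mod (n : Int) 10 = ((n % 10 : Nat) : Int) := by
    exact_mod_cast PySem.Int.mod_natCast n 10
  have l1 : n / 1000 < 10 := by omega
  have l2 : n / 100 % 10 < 10 := by omega
  have l3 : n / 10 % 10 < 10 := by omega
  have l4 : n % 10 < 10 := by omega
  simp only [encode_transponder_bcd_py, encode_transponder_bcd_py_alt, if_neg hneg, if_neg hc,
    pv_digits4 n h, ht, hh, hte, hu]
  by_cases hall : n / 1000 < 8 ∧ n / 100 % 10 < 8 ∧ n / 10 % 10 < 8 ∧ n % 10 < 8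
  · obtain ⟨ha, hb, hcc, hd⟩ := hall
    have g : ¬ ((7:Int) < ((n/1000 : Nat):Int) ∨ (7:Int) < ((n/100%10 : Nat):Int) ∨
        (7:Int) < ((n/10%10 : Nat):Int) ∨ (7:Int) < ((n%10 : Nat):Int)) := by omega
    rw [if_neg (by simp), if_neg (by
      simp only [List.any_cons, List.any_nil, pv_mem8 _ l1, pv_mem8 _ l2, pv_mem8 _ l3, pv_mem8 _ l4]
      simp only [Bool.or_false, ← Bool.or_assoc]
      simp [ha, hb, hcc, hd]), if_neg g]
    simp only [List.foldl, pv_ofc _ l1, pv_ofc _ l2, pv_ofc _ l3, pv_ofc _ l4]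
    exact congrArg some (pv_chain _ ha _ hb _ hcc _ hd)
  · have g : ((7:Int) < ((n/1000 : Nat):Int) ∨ (7:Int) < ((n/100%10 : Nat):Int) ∨
        (7:Int) < ((n/10%10 : Nat):Int) ∨ (7:Int) < ((n%10 : Nat):Int)) := by omega
    rw [if_neg (by simp), if_pos (by
      simp only [List.any_cons, List.any_nil, pv_mem8 _ l1, pv_mem8 _ l2, pv_mem8 _ l3, pv_mem8 _ l4]
      simp only [Bool.or_false, Bool.not_eq_true', decide_eq_false_iff_not, Bool.or_eq_true]
      omega), if_pos g]

-- ===== VERDICT (by name: the statement is the Claim_ definition above) =====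
theorem encode_transponder_bcd_py_spec : Claim_equal_encode_transponder_bcd_py := by
  intro code _
  unfold Spec_encode_transponder_bcd_py
  by_cases hneg : code < 0
  · simp [encode_transponder_bcd_py, encode_transponder_bcd_py_alt, hneg]
  · by_cases hbig : 9999 < code
    · have h5 := pv_toChars_len_big code (by omega)
      have hlen : (List.replicate (4 - (PySem.Int.toChars code).length) '0' ++
          PySem.Int.toChars code).length ≠ 4 := by
        simp only [List.length_append, List.length_replicate]
        omega
      simp only [encode_transponder_bcd_py, encode_transponder_bcd_py_alt, if_neg hneg,
        if_pos (Or.inr hbig), if_pos hlen]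
    · obtain ⟨n, rfl⟩ := Int.eq_ofNat_of_zero_le (show (0:Int) ≤ code by omega)
      exact pv_mid n (by omega)
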